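-- pv_equiv track=rewrite | github.com/ystkc/ystkc.github.io | simple.py | restore_invalid_char
-- ===== SOURCE A (Python) =====
-- def restore_invalid_char(text: str, invalid_storage: dict):
--     # 插入无效字符
--     bad = False # 优先级从高到低
--     accept = False
--     warn = False
--     new_text = ""
--     for position in range(len(text)):
--         if position in invalid_storage:
--             min_char = "9"
--             for char in invalid_storage[position]:
--                 if char.isdigit():
--                     min_char = min(min_char, char)
--                 else:
--                     new_text += char
--             if min_char == "1":
--                 new_text += '\033[31m'
--                 bad = True
--             elif min_char == "2":
--                 new_text += '\033[32m'
--                 accept = True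
--             elif min_char == "3":
--                 new_text += '\033[33m'
--                 warn = True
--             elif bad or accept or warn:
--                 new_text += '\033[0m'
--                 bad = False
--                 accept = False
--                 warn = False
--         new_text += text[position]
--     return new_text
-- ===== SOURCE B (Python) =====
-- def restore_invalid_char(text: str, invalid_storage: dict):
--     # Staged rewrite: walk only the sorted stored positions with a cursor,
--     # emit pieces into a list and join once; one 'colored' flag and a color
--     # table replace A's three booleans and elif chain.
--     COLORS = {"1": "\033[31m", "2": "\033[32m", "3": "\033[33m"}
--     n = len(text)
--     pieces = []
--     colored = False
--     prev = 0
--     for key in sorted(k for k in invalid_storage if 0 <= k < n):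
--         pieces.append(text[prev:key])
--         entries = invalid_storage[key]
--         pieces.extend(c for c in entries if not c.isdigit())
--         digits = [c for c in entries if c.isdigit()]
--         mc = min(digits) if digits else "9"
--         if mc in COLORS:
--             pieces.append(COLORS[mc])
--             colored = True
--         elif colored:
--             pieces.append("\033[0m")
--             colored = False
--         pieces.append(text[key])
--         prev = key + 1
--     pieces.append(text[prev:])
--     return "".join(pieces)
-- ===== Notes on version B (the rewrite author's own statement) =====
-- stated objective: alternative
-- what changed: A scans every character position, tests each against the dict and concatenates onto one string with three colour flags; B sorts the valid stored keys and walks only them with a running cursor, copying untouched stretches as whole slices, splitting each entry list into digit/non-digit stages with a colour lookup table and a single 'colored' flag, and joining the collected pieces once at the end.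
import Mathlib
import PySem

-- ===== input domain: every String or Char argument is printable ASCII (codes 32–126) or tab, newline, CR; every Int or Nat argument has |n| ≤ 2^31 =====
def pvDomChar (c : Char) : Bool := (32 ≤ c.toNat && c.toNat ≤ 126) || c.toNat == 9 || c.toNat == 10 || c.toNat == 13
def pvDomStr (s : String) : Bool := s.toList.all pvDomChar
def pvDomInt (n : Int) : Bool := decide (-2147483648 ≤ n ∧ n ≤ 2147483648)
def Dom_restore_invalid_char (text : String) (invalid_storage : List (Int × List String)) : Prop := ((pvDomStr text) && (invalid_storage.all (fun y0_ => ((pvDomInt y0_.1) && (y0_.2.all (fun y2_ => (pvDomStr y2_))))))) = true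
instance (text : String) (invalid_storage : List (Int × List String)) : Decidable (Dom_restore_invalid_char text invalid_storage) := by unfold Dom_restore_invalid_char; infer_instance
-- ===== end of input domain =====

-- B walks only the sorted stored positions with a cursor, collecting output pieces in a
-- list joined once at the end, with a single 'colored' flag and a color table replacing
-- A's per-character scan and three booleans (objective: alternative; same return value).


-- ===== PORT A =====
-- loop body of A's 'for position in range(len(text))'
def raiStepA (text : String) (invalid_storage : List (Int × List String))
    (st : Bool × Bool × Bool × String) (position : Int) : Bool × Bool × Bool × String :=
  let bad := st.1
  let accept := st.2.1
  let warn := st.2.2.1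
  let new_text := st.2.2.2
  let st1 : Bool × Bool × Bool × String :=
    match (invalid_storage.find? (fun e => e.1 == position)).map Prod.snd with
    | some chars =>
      let mn := chars.foldl
        (fun (p : String × String) char =>
          if PySem.Str.strIsdigit char then (min p.1 char, p.2) else (p.1, p.2 ++ char))
        ("9", new_text)
      let min_char := mn.1
      let nt := mn.2
      if min_char = "1" then (true, accept, warn, nt ++ "\x1b[31m")
      else if min_char = "2" then (bad, true, warn, nt ++ "\x1b[32m")
      else if min_char = "3" then (bad, accept, true, nt ++ "\x1b[33m")
      else if bad || accept || warn then (false, false, false, nt ++ "\x1b[0m")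
      else (bad, accept, warn, nt)
    | none => (bad, accept, warn, new_text)
  (st1.1, st1.2.1, st1.2.2.1, st1.2.2.2.push ((PySem.Str.pyGet? text position).getD ' '))

def restore_invalid_char (text : String) (invalid_storage : List (Int × List String)) : String :=
  ((PySem.List.pyRange 0 (PySem.Str.len text)).foldl (raiStepA text invalid_storage)
    (false, false, false, "")).2.2.2

-- ===== PORT B =====
-- B's COLORS table (a 3-entry literal dict, ported as its association list)
def raiColors : List (String × String) := [("1", "\x1b[31m"), ("2", "\x1b[32m"), ("3", "\x1b[33m")]

-- loop body of B's 'for key in …': state = (pieces, colored, prev)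
def raiStepB (text : String) (invalid_storage : List (Int × List String))
    (st : List String × Bool × Int) (key : Int) : List String × Bool × Int :=
  let colored := st.2.1
  let prev := st.2.2
  let pieces := st.1 ++ [PySem.Str.slice text (some prev) (some key)]
  let entries := ((invalid_storage.find? (fun e => e.1 == key)).map Prod.snd).getD []
  let pieces := pieces ++ entries.filter (fun c => ! PySem.Str.strIsdigit c)
  let digits := entries.filter (fun c => PySem.Str.strIsdigit c)
  let mc := match PySem.List.min? digits (fun x => x) with
    | some m => m
    | none => "9"
  let pc : List String × Bool :=
    match raiColors.find? (fun p => p.1 == mc) with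
    | some p => (pieces ++ [p.2], true)
    | none => if colored then (pieces ++ ["\x1b[0m"], false) else (pieces, colored)
  (pc.1 ++ [String.singleton ((PySem.Str.pyGet? text key).getD ' ')], pc.2, key + 1)

def restore_invalid_char_alt (text : String) (invalid_storage : List (Int × List String)) : String :=
  let n : Int := PySem.Str.len text
  let keys := PySem.List.sorted
      ((PySem.List.dedup (invalid_storage.map Prod.fst)).filter (fun k => decide (0 ≤ k ∧ k < n)))
      (fun k => k) false
  let st := keys.foldl (raiStepB text invalid_storage) ([], false, 0)
  PySem.Str.join "" (st.1 ++ [PySem.Str.slice text (some st.2.2) none])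

-- ===== PRECONDITION & SPEC =====
def Spec_restore_invalid_char (text : String) (invalid_storage : List (Int × List String)) (out : String) : Prop := out = restore_invalid_char_alt text invalid_storage
instance (text : String) (invalid_storage : List (Int × List String)) (out : String) : Decidable (Spec_restore_invalid_char text invalid_storage out) := by unfold Spec_restore_invalid_char; infer_instance

-- ===== CLAIM (what is proved, stated in full; the proofs are below) =====
def Claim_equal_restore_invalid_char : Prop := ∀ (text : String) (invalid_storage : List (Int × List String)), Dom_restore_invalid_char text invalid_storage → Spec_restore_invalid_char text invalid_storage (restore_invalid_char text invalid_storage)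

-- ===== LEMMAS AND PROOFS =====
-- join "" over List Char parts
theorem pvFlattenIntersperseNil : ∀ (l : List (List Char)),
    (List.intersperse ([] : List Char) l).flatten = l.flatten
  | [] => rfl
  | [x] => rfl
  | x :: y :: t => by
    show (x :: [] :: List.intersperse ([] : List Char) (y :: t)).flatten = _
    simp [pvFlattenIntersperseNil (y :: t)]

theorem pvIntercalateNil (l : List (List Char)) :
    List.intercalate ([] : List Char) l = l.flatten := by
  rw [List.intercalate]; exact pvFlattenIntersperseNil l

theorem pvCharsJoinNil (parts : List (List Char)) :
    PySem.Chars.join [] parts = parts.flatten := by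
  simp [PySem.Chars.join, pvIntercalateNil]

theorem pvJoinAppend (l m : List String) :
    PySem.Str.join "" (l ++ m) = PySem.Str.join "" l ++ PySem.Str.join "" m := by
  apply String.ext; simp [pvCharsJoinNil]

theorem pvJoinSingleton (x : String) : PySem.Str.join "" [x] = x := by
  apply String.ext; simp [pvCharsJoinNil]

theorem pvJoinCons (x : String) (l : List String) :
    PySem.Str.join "" (x :: l) = x ++ PySem.Str.join "" l := by
  apply String.ext; simp [pvCharsJoinNil]

theorem pvJoinNil : PySem.Str.join "" ([] : List String) = "" := by
  apply String.ext; simp [pvCharsJoinNil]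

theorem pvStrAssoc (a b c : String) : (a ++ b) ++ c = a ++ (b ++ c) := by
  apply String.ext; simp

theorem pvStepA_no_key (text : String) (inv : List (Int × List String))
    (st : Bool × Bool × Bool × String) (pos : Int)
    (h : inv.find? (fun e => e.1 == pos) = none) :
    raiStepA text inv st pos
      = (st.1, st.2.1, st.2.2.1, st.2.2.2.push ((PySem.Str.pyGet? text pos).getD ' ')) := by
  simp [raiStepA, h]

theorem pvSliceSelf (text : String) (p : Int) : PySem.Str.slice text (some p) (some p) = "" := by
  apply String.ext
  simp [PySem.Str.toList_slice, PySem.Chars.slice_eq_listSlice, PySem.List.slice]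

theorem pvSliceCons (text : String) (p q : Int) (c : Char)
    (hp : 0 ≤ p) (hpq : p < q)
    (hc : text.toList[p.toNat]? = some c) :
    PySem.Str.slice text (some p) (some q)
      = String.singleton c ++ PySem.Str.slice text (some (p + 1)) (some q) := by
  apply String.ext
  obtain ⟨hlt, h1⟩ := List.getElem?_eq_some_iff.mp hc
  rw [String.toList_append, PySem.Str.toList_slice, PySem.Str.toList_slice,
    PySem.Chars.slice_eq_listSlice, PySem.Chars.slice_eq_listSlice,
    PySem.List.slice_toNat _ hp (by omega), PySem.List.slice_toNat _ (by omega) (by omega),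
    List.drop_eq_getElem_cons hlt]
  have h2 : (p+1).toNat = p.toNat + 1 := by omega
  have h3 : q.toNat - p.toNat = q.toNat - (p.toNat + 1) + 1 := by omega
  rw [h1, h2, h3, List.take_succ_cons]
  simp

theorem pvPushAppend (s : String) (c : Char) (t : String) :
    (s.push c) ++ t = s ++ (String.singleton c ++ t) := by
  apply String.ext; simp

theorem pvSliceAll (text : String) (p : Int) (hp : 0 ≤ p) :
    PySem.Str.slice text (some p) (some ((text.toList.length : Int)))
      = PySem.Str.slice text (some p) none := by
  apply String.ext
  rw [PySem.Str.toList_slice, PySem.Str.toList_slice,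
    PySem.Chars.slice_eq_listSlice, PySem.Chars.slice_eq_listSlice,
    PySem.List.slice_toNat _ hp (by positivity), PySem.List.slice_from _ hp]
  apply List.take_of_length_le
  simp

-- A's plain-character stretch: the foldl over an event-free range appends a slice
theorem pvSegA (text : String) (inv : List (Int × List String)) :
    ∀ (k : Nat) (p q : Int), 0 ≤ p → p ≤ q → q ≤ (text.toList.length : Int) → (q - p).toNat = k →
    (∀ j, p ≤ j → j < q → inv.find? (fun e => e.1 == j) = none) →
    ∀ (st : Bool × Bool × Bool × String),
    (PySem.List.pyRange p q).foldl (raiStepA text inv) st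
      = (st.1, st.2.1, st.2.2.1, st.2.2.2 ++ PySem.Str.slice text (some p) (some q)) := by
  intro k
  induction k with
  | zero =>
    intro p q hp hpq hq hk hno st
    have : q = p := by omega
    subst this
    rw [PySem.List.pyRange_one_eq_nil (by omega), pvSliceSelf]
    simp
  | succ k ih =>
    intro p q hp hpq hq hk hno st
    have hlt : p < q := by omega
    rw [PySem.List.pyRange_one_cons hlt, List.foldl_cons,
      pvStepA_no_key _ _ _ _ (hno p (by omega) hlt)]
    have hplen : p.toNat < text.toList.length := by omega
    have hc : text.toList[p.toNat]? = some text.toList[p.toNat] := by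
      exact List.getElem?_eq_getElem hplen
    have hget : (PySem.Str.pyGet? text p).getD ' ' = text.toList[p.toNat] := by
      have h0 : PySem.Str.pyGet? text p = text.toList[p.toNat]? := by
        simp [PySem.List.pyGet?_of_nonneg _ hp]
      rw [h0, hc, Option.getD_some]
    rw [ih (p+1) q (by omega) (by omega) hq (by omega)
      (fun j h1 h2 => hno j (by omega) h2)]
    simp only [hget]
    rw [pvPushAppend, pvSliceCons text p q _ hp hlt hc]

-- A's event at a stored position, as a function of (chars, flags, string so far)
def pvEvent (chars : List String) (bad accept warn : Bool) (out : String) :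
    Bool × Bool × Bool × String :=
  let mn := chars.foldl
    (fun (p : String × String) char =>
      if PySem.Str.strIsdigit char then (min p.1 char, p.2) else (p.1, p.2 ++ char))
    ("9", out)
  let min_char := mn.1
  let nt := mn.2
  if min_char = "1" then (true, accept, warn, nt ++ "\x1b[31m")
  else if min_char = "2" then (bad, true, warn, nt ++ "\x1b[32m")
  else if min_char = "3" then (bad, accept, true, nt ++ "\x1b[33m")
  else if bad || accept || warn then (false, false, false, nt ++ "\x1b[0m")
  else (bad, accept, warn, nt)

theorem pvStepA_key (text : String) (inv : List (Int × List String))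
    (st : Bool × Bool × Bool × String) (pos : Int) (e : Int × List String)
    (h : inv.find? (fun x => x.1 == pos) = some e) :
    raiStepA text inv st pos
      = (let E := pvEvent e.2 st.1 st.2.1 st.2.2.1 st.2.2.2
         (E.1, E.2.1, E.2.2.1, E.2.2.2.push ((PySem.Str.pyGet? text pos).getD ' '))) := by
  simp [raiStepA, pvEvent, h]

-- B's event result (pieces', colored') as a function of (chars, colored, pieces so far)
def pvEventB (chars : List String) (colored : Bool) (pieces : List String) :
    List String × Bool :=
  let pieces := pieces ++ chars.filter (fun c => ! PySem.Str.strIsdigit c)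
  let digits := chars.filter (fun c => PySem.Str.strIsdigit c)
  let mc := match PySem.List.min? digits (fun x => x) with
    | some m => m
    | none => "9"
  match raiColors.find? (fun p => p.1 == mc) with
  | some p => (pieces ++ [p.2], true)
  | none => if colored then (pieces ++ ["\x1b[0m"], false) else (pieces, colored)

theorem pvStepB_key (text : String) (inv : List (Int × List String))
    (st : List String × Bool × Int) (key : Int) (e : Int × List String)
    (h : inv.find? (fun x => x.1 == key) = some e) :
    raiStepB text inv st key
      = (let pc := pvEventB e.2 st.2.1 (st.1 ++ [PySem.Str.slice text (some st.2.2) (some key)])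
         (pc.1 ++ [String.singleton ((PySem.Str.pyGet? text key).getD ' ')], pc.2, key + 1)) := by
  simp [raiStepB, pvEventB, h]

-- A's inner scan = (running min over the digit entries, out ++ the non-digit entries)
theorem pvFoldInner : ∀ (chars : List String) (m out : String),
    chars.foldl
      (fun (p : String × String) char =>
        if PySem.Str.strIsdigit char then (min p.1 char, p.2) else (p.1, p.2 ++ char))
      (m, out)
    = ((chars.filter (fun c => PySem.Str.strIsdigit c)).foldl min m,
       out ++ PySem.Str.join "" (chars.filter (fun c => ! PySem.Str.strIsdigit c))) := by
  intro chars
  induction chars with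
  | nil => intro m out; simp [pvJoinNil]
  | cons c t ih =>
    intro m out
    by_cases hd : PySem.Str.strIsdigit c
    · rw [List.foldl_cons, if_pos hd, ih, List.filter_cons, List.filter_cons]
      have hd' : PySem.Chars.strIsdigit c.toList = true := by simpa using hd
      simp [hd, hd']
    · rw [List.foldl_cons, if_neg hd, ih, List.filter_cons, List.filter_cons]
      have hd' : PySem.Chars.strIsdigit c.toList = false := by simpa using hd
      simp [hd, hd', pvJoinCons, pvStrAssoc]

theorem pvFoldlMinComm (t : List String) : ∀ (a b : String),
    t.foldl min (min a b) = min a (t.foldl min b) := by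
  induction t with
  | nil => intro a b; simp
  | cons x t ih =>
    intro a b
    simp only [List.foldl_cons, min_assoc, ih]

-- bridge: A's event and B's event agree (string = join of pieces, colored = flag disjunction)
theorem pvEventBridge (chars : List String) (bad accept warn : Bool) (pieces : List String) :
    (pvEvent chars bad accept warn (PySem.Str.join "" pieces)).2.2.2
        = PySem.Str.join "" (pvEventB chars (bad || accept || warn) pieces).1
    ∧ ((pvEvent chars bad accept warn (PySem.Str.join "" pieces)).1
        || (pvEvent chars bad accept warn (PySem.Str.join "" pieces)).2.1
        || (pvEvent chars bad accept warn (PySem.Str.join "" pieces)).2.2.1)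
        = (pvEventB chars (bad || accept || warn) pieces).2 := by
  have hfold := pvFoldInner chars "9" (PySem.Str.join "" pieces)
  simp only [pvEvent, pvEventB, hfold]
  generalize List.filter (fun c => PySem.Str.strIsdigit c) chars = digits
  generalize List.filter (fun c => ! PySem.Str.strIsdigit c) chars = nd
  rcases digits with _ | ⟨x, t⟩
  · -- no digit entries: both minima are "9", both fall to the reset/no-op branch
    simp only [List.foldl_nil, PySem.List.min?]
    rw [show raiColors.find? (fun p => p.1 == "9") = none from by decide]
    cases hflag : (bad || accept || warn) <;>
      simp [hflag, show ¬ ("9":String) = "1" from by decide, show ¬ ("9":String) = "2" from by decide,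
        show ¬ ("9":String) = "3" from by decide, pvJoinAppend, pvJoinSingleton, pvStrAssoc]
  · -- digit entries x :: t: A's minimum over "9" vs B's minimum of the list
    rw [PySem.List.min?_id_cons]
    set mB := t.foldl min x with hmB
    have hA : List.foldl min "9" (x :: t) = min "9" mB := by
      rw [List.foldl_cons, ← pvFoldlMinComm]
    rw [hA]
    have hmin_cases : min "9" mB = "9" ∨ min "9" mB = mB := by
      rcases min_cases ("9" : String) mB with h | h
      · exact Or.inl h.1
      · exact Or.inr h.1
    by_cases h1 : mB = "1"
    · have hm : min "9" mB = "1" := by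
        rw [h1]; exact min_eq_right (by rw [String.le_iff_toList_le]; decide)
      rw [hm, h1, show raiColors.find? (fun p => p.1 == "1")
            = some ("1", "\x1b[31m") from by decide]
      simp [pvJoinAppend, pvJoinSingleton, pvStrAssoc]
    · by_cases h2 : mB = "2"
      · have hm : min "9" mB = "2" := by
          rw [h2]; exact min_eq_right (by rw [String.le_iff_toList_le]; decide)
        rw [hm, h2, show raiColors.find? (fun p => p.1 == "2")
              = some ("2", "\x1b[32m") from by decide]
        simp [show ¬ ("2":String) = "1" from by decide, pvJoinAppend, pvJoinSingleton, pvStrAssoc]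
      · by_cases h3 : mB = "3"
        · have hm : min "9" mB = "3" := by
            rw [h3]; exact min_eq_right (by rw [String.le_iff_toList_le]; decide)
          rw [hm, h3, show raiColors.find? (fun p => p.1 == "3")
                = some ("3", "\x1b[33m") from by decide]
          simp [show ¬ ("3":String) = "1" from by decide, show ¬ ("3":String) = "2" from by decide,
            pvJoinAppend, pvJoinSingleton, pvStrAssoc]
        · -- minimum not a color key: both take the reset/no-op branch
          have hAne : ¬ min "9" mB = "1" ∧ ¬ min "9" mB = "2" ∧ ¬ min "9" mB = "3" := by
            rcases hmin_cases with h | h <;> rw [h]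
            · exact ⟨by decide, by decide, by decide⟩
            · exact ⟨h1, h2, h3⟩
          have hfind : raiColors.find? (fun p => p.1 == mB) = none := by
            have b1 : (("1" : String) == mB) = false := beq_eq_false_iff_ne.mpr (fun h => h1 h.symm)
            have b2 : (("2" : String) == mB) = false := beq_eq_false_iff_ne.mpr (fun h => h2 h.symm)
            have b3 : (("3" : String) == mB) = false := beq_eq_false_iff_ne.mpr (fun h => h3 h.symm)
            simp [raiColors, List.find?, b1, b2, b3]
          rw [hfind]
          cases hflag : (bad || accept || warn) <;>
            simp [hflag, hAne.1, hAne.2.1, hAne.2.2, pvJoinAppend, pvJoinSingleton, pvStrAssoc]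

-- main correspondence: A's scan from 'prev' = B's walk over the remaining sorted keys
theorem pvMain (text : String) (inv : List (Int × List String)) :
    ∀ (ks : List Int), ks.Pairwise (· < ·) →
    ∀ (prev : Int), 0 ≤ prev → prev ≤ (text.toList.length : Int) →
    (∀ k ∈ ks, prev ≤ k ∧ k < (text.toList.length : Int)) →
    (∀ j, prev ≤ j → j < (text.toList.length : Int) →
        ((inv.find? (fun e => e.1 == j)).isSome ↔ j ∈ ks)) →
    ∀ (bad accept warn : Bool) (pieces : List String),
    ((PySem.List.pyRange prev (text.toList.length : Int)).foldl (raiStepA text inv)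
        (bad, accept, warn, PySem.Str.join "" pieces)).2.2.2
      = (let t := ks.foldl (raiStepB text inv) (pieces, bad || accept || warn, prev)
         PySem.Str.join "" (t.1 ++ [PySem.Str.slice text (some t.2.2) none])) := by
  intro ks
  induction ks with
  | nil =>
    intro _ prev hp hle hks hcov bad accept warn pieces
    rw [pvSegA text inv (((text.toList.length : Int)) - prev).toNat prev _ hp hle le_rfl rfl
        (fun j h1 h2 => by
          have := hcov j h1 h2
          simp at this
          exact Option.not_isSome_iff_eq_none.mp (by simp [this]))]
    simp only [List.foldl_nil]
    rw [pvJoinAppend, pvJoinSingleton, pvSliceAll text prev hp]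
  | cons k ks' ih =>
    intro hpw prev hp hle hks hcov bad accept warn pieces
    obtain ⟨hk1, hk2⟩ := hks k (by simp)
    have hsome : (inv.find? (fun e => e.1 == k)).isSome := by
      rw [hcov k hk1 hk2]; simp
    obtain ⟨e, he⟩ := Option.isSome_iff_exists.mp hsome
    have htail : ∀ x ∈ ks', k < x := by
      intro x hx; exact (List.pairwise_cons.mp hpw).1 x hx
    have hno : ∀ j, prev ≤ j → j < k → inv.find? (fun x => x.1 == j) = none := by
      intro j h1 h2
      apply Option.not_isSome_iff_eq_none.mp
      rw [hcov j h1 (by omega)]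
      simp only [List.mem_cons]
      rintro (rfl | hj)
      · omega
      · exact absurd (htail j hj) (by omega)
    -- split A's range at k, run the event step, then use the IH
    rw [PySem.List.pyRange_one_append prev k _ hk1 (le_of_lt hk2), List.foldl_append,
      pvSegA text inv (k - prev).toNat prev k hp hk1 (le_of_lt hk2) rfl hno,
      PySem.List.pyRange_one_cons hk2, List.foldl_cons,
      pvStepA_key text inv _ k e he]
    rw [List.foldl_cons, pvStepB_key text inv _ k e he]
    have hjoin : PySem.Str.join "" pieces ++ PySem.Str.slice text (some prev) (some k)
        = PySem.Str.join "" (pieces ++ [PySem.Str.slice text (some prev) (some k)]) := by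
      rw [pvJoinAppend, pvJoinSingleton]
    rw [hjoin]
    set E := pvEvent e.2 bad accept warn
      (PySem.Str.join "" (pieces ++ [PySem.Str.slice text (some prev) (some k)])) with hE
    set pc := pvEventB e.2 (bad || accept || warn)
      (pieces ++ [PySem.Str.slice text (some prev) (some k)]) with hpc
    have hb := pvEventBridge e.2 bad accept warn
      (pieces ++ [PySem.Str.slice text (some prev) (some k)])
    rw [← hE, ← hpc] at hb
    obtain ⟨hstr, hflag⟩ := hb
    have hIH := ih (List.pairwise_cons.mp hpw).2 (k+1) (by omega) (by omega)
      (fun x hx => ⟨by have := htail x hx; omega, (hks x (by simp [hx])).2⟩)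
      (fun j h1 h2 => by
        rw [hcov j (by omega) h2]
        simp only [List.mem_cons]
        constructor
        · rintro (rfl | h); · omega
          · exact h
        · intro h; exact Or.inr h)
      E.1 E.2.1 E.2.2.1
      (pc.1 ++ [String.singleton ((PySem.Str.pyGet? text k).getD ' ')])
    rw [hflag] at hIH
    have hpush : E.2.2.2.push ((PySem.Str.pyGet? text k).getD ' ')
        = PySem.Str.join ""
            (pc.1 ++ [String.singleton ((PySem.Str.pyGet? text k).getD ' ')]) := by
      rw [pvJoinAppend, pvJoinSingleton, hstr]
      apply String.ext; simp
    simp only [hpush]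
    exact hIH

-- ===== VERDICT (by name: the statement is the Claim_ definition above) =====
theorem restore_invalid_char_spec : Claim_equal_restore_invalid_char := by
  intro text inv _
  unfold Spec_restore_invalid_char
  have hn : PySem.Str.len text = (text.toList.length : Int) := by simp
  unfold restore_invalid_char restore_invalid_char_alt
  simp only [hn]
  set n : Int := (text.toList.length : Int) with hdefn
  set keys := PySem.List.sorted
      ((PySem.List.dedup (inv.map Prod.fst)).filter (fun k => decide (0 ≤ k ∧ k < n)))
      (fun k => k) false with hkeys
  have hnodup : keys.Nodup := by
    rw [hkeys]
    exact (PySem.List.sorted_perm _ _ _).nodup_iff.mpr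
      ((PySem.List.nodup_dedup _).filter _)
  have hle : keys.Pairwise (fun a b => a ≤ b) := by
    rw [hkeys]; exact PySem.List.sorted_pairwise _ _
  have hpw : keys.Pairwise (· < ·) :=
    (hle.and hnodup).imp (fun h => lt_of_le_of_ne h.1 h.2)
  have hmem : ∀ x, x ∈ keys ↔ ((inv.find? (fun e => e.1 == x)).isSome ∧ 0 ≤ x ∧ x < n) := by
    intro x
    rw [hkeys, PySem.List.mem_sorted, List.mem_filter, PySem.List.mem_dedup]
    rw [List.find?_isSome]
    simp [List.mem_map]
  have h0 : (false, false, false, ("" : String))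
      = ((false : Bool), (false : Bool), (false : Bool), PySem.Str.join "" ([] : List String)) := by
    rw [pvJoinNil]
  rw [h0]
  rw [pvMain text inv keys hpw 0 le_rfl (by positivity)
    (fun k hk => by have := (hmem k).mp hk; exact ⟨this.2.1, this.2.2⟩)
    (fun j h1 h2 => by
      rw [hmem j]
      constructor
      · intro h; exact ⟨h, h1, h2⟩
      · intro h; exact h.1)]
  simp
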